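-- pv_equiv track=rewrite | github.com/jaapkruijt/spot_disambiguation_model | src/spot/pragmatic_model/model_ambiguity.py | find_losing_hair_colours
-- ===== SOURCE A (Python) =====
-- def find_losing_hair_colours(match):
--     colours = {}
--     hair_colours = ['bruin haar', 'grijs haar', 'zwart haar', 'blond haar', 'donkerblond haar', 'donker haar']
--     for score, attribute in match:
--         if attribute in hair_colours:
--             colours[attribute] = score
--     sorted_colours = dict(sorted(colours.items(), key=lambda item: item[1], reverse=True))
--     winner = next(iter(sorted_colours))
--     losers = list(colours.keys())
--     losers.remove(winner)
--
--     return losers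
-- ===== SOURCE B (Python) =====
-- def find_losing_hair_colours(match):
--     hair_colours = ['bruin haar', 'grijs haar', 'zwart haar', 'blond haar', 'donkerblond haar', 'donker haar']
--     colours = {}
--     for score, attribute in match:
--         if attribute in hair_colours:
--             colours[attribute] = score
--     it = iter(colours.items())
--     winner, best = next(it)
--     for k, v in it:
--         if v > best:
--             winner, best = k, v
--     return [k for k in colours if k != winner]
-- ===== Notes on version B (the rewrite author's own statement) =====
-- stated objective: simpler
-- what changed: Replaces A's sort-the-whole-dict-to-read-one-winner plus list.remove with a single linear max-scan (strict > keeps the first-inserted colour on ties, like A's stable reverse sort) and a filter comprehension for the losers.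
import Mathlib
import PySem

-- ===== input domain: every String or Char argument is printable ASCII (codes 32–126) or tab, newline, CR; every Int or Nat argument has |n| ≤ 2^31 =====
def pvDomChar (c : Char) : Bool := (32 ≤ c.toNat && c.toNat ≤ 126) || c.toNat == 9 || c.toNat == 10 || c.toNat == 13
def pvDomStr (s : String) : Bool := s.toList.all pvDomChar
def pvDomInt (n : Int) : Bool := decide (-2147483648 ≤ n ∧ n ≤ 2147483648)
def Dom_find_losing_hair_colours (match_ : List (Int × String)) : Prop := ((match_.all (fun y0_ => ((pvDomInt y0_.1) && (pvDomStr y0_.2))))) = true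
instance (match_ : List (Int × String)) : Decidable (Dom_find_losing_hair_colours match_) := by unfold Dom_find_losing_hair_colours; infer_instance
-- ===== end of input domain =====

-- B replaces A's "sort all scored colours, take the head, list.remove the winner" by a single
-- linear strict-> max-scan over the dict items and a filter for the losers (objective: simpler).


def pvHairColours : List String :=
  ["bruin haar", "grijs haar", "zwart haar", "blond haar", "donkerblond haar", "donker haar"]

-- the {colour: score} dict both Pythons build with the same loop
def pvColours (match_ : List (Int × String)) : PySem.Dict String Int :=
  match_.foldl (fun d sa => if sa.2 ∈ pvHairColours then d.insert sa.2 sa.1 else d)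
    PySem.Dict.empty

-- ===== PORT A =====
def find_losing_hair_colours (match_ : List (Int × String)) : List String :=
  let colours := pvColours match_
  let sorted_colours := PySem.List.sorted colours.items (fun it => it.2) true
  match sorted_colours with
  | [] => []          -- Python: next(iter(...)) raises StopIteration; excluded by Pre_
  | winner :: _ =>
    match PySem.List.remove? colours.keys winner.1 with
    | some losers => losers
    | none => []      -- unreachable: the winner is a key

-- ===== PORT B =====
def find_losing_hair_colours_alt (match_ : List (Int × String)) : List String :=
  let colours := pvColours match_
  match colours.items with
  | [] => []          -- Python: next(it) raises StopIteration; excluded by Pre_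
  | first :: rest =>
    let wb := rest.foldl (fun best kv => if kv.2 > best.2 then kv else best) first
    colours.keys.filter (fun k => k ≠ wb.1)

-- ===== PRECONDITION & SPEC =====
-- Pre_ excludes exactly the inputs with no hair-colour attribute, on which both Pythons raise StopIteration.
def Pre_find_losing_hair_colours (match_ : List (Int × String)) : Prop :=
  ∃ p ∈ match_, p.2 ∈ pvHairColours
instance (match_ : List (Int × String)) : Decidable (Pre_find_losing_hair_colours match_) := by
  unfold Pre_find_losing_hair_colours; infer_instance
def pvWitness_find_losing_hair_colours : (List (Int × String)) := [(1, "blond haar")]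

def Spec_find_losing_hair_colours (match_ : List (Int × String)) (out : List String) : Prop := out = find_losing_hair_colours_alt match_
instance (match_ : List (Int × String)) (out : List String) : Decidable (Spec_find_losing_hair_colours match_ out) := by unfold Spec_find_losing_hair_colours; infer_instance

-- ===== CLAIM (what is proved, stated in full; the proofs are below) =====
def Claim_equal_find_losing_hair_colours : Prop := ∀ (match_ : List (Int × String)), Dom_find_losing_hair_colours match_ → Pre_find_losing_hair_colours match_ → Spec_find_losing_hair_colours match_ (find_losing_hair_colours match_)

-- ===== LEMMAS AND PROOFS =====

-- the dict's keys stay Nodup through the conditional-insert loop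
theorem pvColours_nodup_aux (l : List (Int × String)) (d : PySem.Dict String Int)
    (h : d.keys.Nodup) :
    (l.foldl (fun d sa => if sa.2 ∈ pvHairColours then d.insert sa.2 sa.1 else d) d).keys.Nodup := by
  induction l generalizing d with
  | nil => exact h
  | cons p t ih =>
    simp only [List.foldl_cons]
    split
    · exact ih _ (PySem.Dict.nodup_keys_insert _ _ _ h)
    · exact ih _ h

theorem pvColours_nodup (match_ : List (Int × String)) : (pvColours match_).keys.Nodup :=
  pvColours_nodup_aux _ _ (by simp [PySem.Dict.empty])

-- under Pre_, the dict is nonempty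
theorem pvColours_ne_nil_aux (l : List (Int × String)) (d : PySem.Dict String Int)
    (h : d.items ≠ [] ∨ ∃ p ∈ l, p.2 ∈ pvHairColours) :
    (l.foldl (fun d sa => if sa.2 ∈ pvHairColours then d.insert sa.2 sa.1 else d) d).items ≠ [] := by
  induction l generalizing d with
  | nil => simpa using h
  | cons p t ih =>
    simp only [List.foldl_cons]
    split
    · refine ih _ (Or.inl ?_)
      rw [PySem.Dict.items_insert]
      split
      · rename_i hc
        have : d.items ≠ [] := by
          intro hnil
          rw [PySem.Dict.contains_iff_mem_keys] at hc
          simp [PySem.Dict.keys, hnil] at hc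
        intro hmap; exact this (List.map_eq_nil_iff.mp hmap)
      · simp
    · rename_i hni
      refine ih _ ?_
      rcases h with h | ⟨q, hq, hqc⟩
      · exact Or.inl h
      · rcases List.mem_cons.mp hq with rfl | hq2
        · exact absurd hqc hni
        · exact Or.inr ⟨q, hq2, hqc⟩

-- head of the stable reverse sort = left-to-right strict-> first max
theorem head_sorted_rev (xs : List (String × Int)) :
    (PySem.List.sorted xs (fun it => it.2) true).head? =
      xs.foldl (fun acc kv => match acc with
        | none => some kv
        | some b => if b.2 < kv.2 then some kv else some b) none := by
  induction xs using List.reverseRecOn with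
  | nil => rfl
  | append_singleton xs x ih =>
    have hsor : ∀ ys : List (String × Int),
        PySem.List.sorted ys (fun it => it.2) true =
          List.foldl (fun acc x => PySem.List.insertBy (fun a b => decide (b.2 < a.2)) x acc)
            [] ys := fun ys => rfl
    rw [hsor, List.foldl_append, List.foldl_cons, List.foldl_nil, List.foldl_append,
      List.foldl_cons, List.foldl_nil]
    rw [hsor] at ih
    cases hs : List.foldl (fun acc x_1 =>
        PySem.List.insertBy (fun a b => decide (b.2 < a.2)) x_1 acc) [] xs with
    | nil =>
      rw [hs] at ih
      simp [PySem.List.insertBy, ← ih]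
    | cons y ys =>
      rw [hs] at ih
      simp only [List.head?] at ih
      rw [← ih]
      simp only [PySem.List.insertBy]
      split <;> simp_all

-- option fold = plain fold from the first element
theorem foldl_opt_eq (rest : List (String × Int)) (p : String × Int) :
    rest.foldl (fun acc kv => match acc with
        | none => some kv
        | some b => if b.2 < kv.2 then some kv else some b) (some p) =
      some (rest.foldl (fun best kv => if kv.2 > best.2 then kv else best) p) := by
  induction rest generalizing p with
  | nil => rfl
  | cons q t ih =>
    simp only [List.foldl_cons, gt_iff_lt]
    split <;> exact ih _

-- ===== VERDICT (by name: the statement is the Claim_ definition above) =====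
theorem find_losing_hair_colours_spec : Claim_equal_find_losing_hair_colours := by
  intro match_ _ hpre
  unfold Spec_find_losing_hair_colours
  simp only [find_losing_hair_colours, find_losing_hair_colours_alt]
  have hnodup := pvColours_nodup match_
  have hne : (pvColours match_).items ≠ [] :=
    pvColours_ne_nil_aux match_ _ (Or.inr hpre)
  cases hitems : (pvColours match_).items with
  | nil => exact absurd hitems hne
  | cons first rest =>
    -- B's winner
    set wb := rest.foldl (fun best kv => if kv.2 > best.2 then kv else best) first with hwb
    -- A's sorted head equals B's winner
    have hhead : (PySem.List.sorted (pvColours match_).items (fun it => it.2) true).head? =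
        some wb := by
      rw [head_sorted_rev, hitems, List.foldl_cons, foldl_opt_eq]
    cases hsort : PySem.List.sorted (pvColours match_).items (fun it => it.2) true with
    | nil => rw [hsort] at hhead; simp at hhead
    | cons w ws =>
      rw [hsort] at hhead
      simp only [List.head?, Option.some.injEq] at hhead
      subst hhead
      -- the winner is a member of items, hence its key is a key
      have hwmem : wb ∈ (pvColours match_).items := by
        have : wb ∈ PySem.List.sorted (pvColours match_).items (fun it => it.2) true := by
          rw [hsort]; exact List.mem_cons_self
        exact (PySem.List.mem_sorted _ _ _ _).mp this
      have hkmem : wb.1 ∈ (pvColours match_).keys := PySem.Dict.mem_keys_of_mem_items _ hwmem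
      rw [hitems] at hsort
      conv_lhs => rw [hsort]
      simp only
      rw [PySem.List.remove?_eq_some_erase _ _ hkmem]
      simp only
      rw [List.Nodup.erase_eq_filter hnodup]
      apply List.filter_congr
      intro x _
      simp only [bne, decide_not, Bool.not_inj_iff]
      show (x == wb.1) = decide (x = wb.1)
      exact Bool.beq_eq_decide_eq x wb.1
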